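-- pv_equiv track=rewrite | github.com/higuseonhye/coding_test | 프로그래머스/lv3/42895. N으로 표현/N으로 표현.py | solution
-- ===== SOURCE A (Python) =====
-- def solution(N, number):
--     # 각 숫자마다 만들 수 있는 숫자 집합 초기화
--     possible_nums = [set() for _ in range(9)]
--     for i in range(1, 9):
--         possible_nums[i].add(int(str(N) * i))
--
--     # 사칙연산을 통해 만들 수 있는 숫자 찾기
--     for i in range(1, 9):
--         for j in range(1, i):
--             for x in possible_nums[j]:
--                 for y in possible_nums[i - j]:
--                     possible_nums[i].add(x + y)
--                     possible_nums[i].add(x - y)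
--                     possible_nums[i].add(y - x)
--                     possible_nums[i].add(x * y)
--                     if y != 0:
--                         possible_nums[i].add(x // y)
--                     if x != 0:
--                         possible_nums[i].add(y // x)
--
--         if number in possible_nums[i]:
--             return i
--
--     return -1
-- ===== SOURCE B (Python) =====
-- def solution(N, number):
--     # Top-down memoized recursion: reach(k) = set of values expressible
--     # with exactly k copies of N (same arithmetic closure as the problem).
--     cache = {}
--
--     def reach(k):
--         if k in cache:
--             return cache[k]
--         s = {int(str(N) * k)}
--         for a in range(1, k):
--             for x in reach(a):
--                 for y in reach(k - a):
--                     s |= {x + y, x - y, y - x, x * y}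
--                     if y != 0:
--                         s.add(x // y)
--                     if x != 0:
--                         s.add(y // x)
--         cache[k] = s
--         return s
--
--     return next((k for k in range(1, 9) if number in reach(k)), -1)
-- ===== Notes on version B (the rewrite author's own statement) =====
-- stated objective: alternative
-- what changed: Replaces A's bottom-up table of 9 sets mutated by an indexed triple loop with a top-down memoized recursion reach(k) over levels plus a next(...) scan, seeding the concatenation per level inside the recursion.
import Mathlib
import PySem

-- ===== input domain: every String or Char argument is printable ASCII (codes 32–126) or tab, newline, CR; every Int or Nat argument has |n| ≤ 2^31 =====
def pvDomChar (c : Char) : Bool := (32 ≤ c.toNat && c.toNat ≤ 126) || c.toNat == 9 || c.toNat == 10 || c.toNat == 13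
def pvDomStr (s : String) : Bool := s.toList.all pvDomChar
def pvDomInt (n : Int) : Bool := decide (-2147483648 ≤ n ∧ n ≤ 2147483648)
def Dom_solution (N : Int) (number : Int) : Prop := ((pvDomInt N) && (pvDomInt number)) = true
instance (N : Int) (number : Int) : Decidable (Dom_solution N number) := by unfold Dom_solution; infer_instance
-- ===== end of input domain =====

-- B restructures A's bottom-up 9-set table into a top-down recursion reach(k) per level
-- (memoized in Python; the cache is pure memoization, so the Lean port recomputes the same values).
-- Internal 'set's are Std.TreeSet Int: both Pythons consume their sets only through membership and
-- by building further sets, never through iteration order, so a TreeSet computes exactly the same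
-- results (a list-backed set makes each add a linear scan and the port unevaluable on full runs).

-- ===== PORT A =====
-- shared arithmetic core: both Pythons compute int(str(N)*k) and the same six operations per (x, y) pair
-- int(str(N) * k): exact for N ≥ 0 (Pre_); for N < 0 and k ≥ 2 Python raises ValueError (excluded by Pre_solution)
def concatN (N : Int) (k : Nat) : Int :=
  (PySem.Int.ofChars? (List.flatten (List.replicate k (PySem.Int.toChars N)))).getD 0

-- the six adds performed for one pair (x, y), in Python's order
def pairAdd (s : Std.TreeSet Int compare) (x y : Int) : Std.TreeSet Int compare :=
  let s := (((s.insert (x + y)).insert (x - y)).insert (y - x)).insert (x * y)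
  let s := if y ≠ 0 then s.insert (PySem.Int.floordiv x y) else s
  if x ≠ 0 then s.insert (PySem.Int.floordiv y x) else s

-- 'for x in sx: for y in sy: <six adds>'
def combine (s sx sy : Std.TreeSet Int compare) : Std.TreeSet Int compare :=
  sx.toList.foldl (fun s x => sy.toList.foldl (fun s y => pairAdd s x y) s) s

-- '[set() for _ in range(9)]' then 'for i in range(1, 9): possible_nums[i].add(int(str(N)*i))'
def seedSets (N : Int) : List (Std.TreeSet Int compare) :=
  (List.range' 1 8).foldl
    (fun pn i => pn.set i ((pn.getD i Std.TreeSet.empty).insert (concatN N i)))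
    (List.replicate 9 Std.TreeSet.empty)

-- the 'for j in range(1, i)' body at level i; accumulates possible_nums[i] (the only entry mutated)
def levelStep (pn : List (Std.TreeSet Int compare)) (i : Nat) : Std.TreeSet Int compare :=
  (List.range' 1 (i - 1)).foldl
    (fun s j => combine s (pn.getD j Std.TreeSet.empty) (pn.getD (i - j) Std.TreeSet.empty))
    (pn.getD i Std.TreeSet.empty)

-- 'for i in range(1, 9): … if number in possible_nums[i]: return i' / fall through to -1
def mainLoop (number : Int) (pn : List (Std.TreeSet Int compare)) (i : Nat) : Int :=
  if _h : i < 9 then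
    if ((pn.set i (levelStep pn i)).getD i Std.TreeSet.empty).contains number then (i : Int)
    else mainLoop number (pn.set i (levelStep pn i)) (i + 1)
  else -1
termination_by 9 - i

def solution (N : Int) (number : Int) : Int :=
  mainLoop number (seedSets N) 1

-- ===== PORT B =====
-- reach(k): seed {int(str(N)*k)}, then union combinations of reach(a), reach(k-a) for a in 1..k-1
-- (the Python cache only short-circuits repeated calls to the same pure value)
def reach (N : Int) (k : Nat) : Std.TreeSet Int compare :=
  (List.range' 1 (k - 1)).attach.foldl
    (fun s a => combine s (reach N a.1) (reach N (k - a.1)))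
    (Std.TreeSet.empty.insert (concatN N k))
termination_by k
decreasing_by
  · have := a.2; rw [List.mem_range'_1] at this; omega
  · have := a.2; rw [List.mem_range'_1] at this; omega

-- 'next((k for k in range(1, 9) if number in reach(k)), -1)'
def solution_alt (N : Int) (number : Int) : Int :=
  match (List.range' 1 8).find? (fun k => (reach N k).contains number) with
  | some k => (k : Int)
  | none => -1

-- ===== PRECONDITION & SPEC =====
-- Python A raises ValueError for N < 0 (int("-3-3") at the i = 2 seed), so those inputs are excluded.
def Pre_solution (N : Int) (number : Int) : Prop := 0 ≤ N
instance (N : Int) (number : Int) : Decidable (Pre_solution N number) := by unfold Pre_solution; infer_instance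
def pvWitness_solution : Int × Int := (5, 12)

def Spec_solution (N : Int) (number : Int) (out : Int) : Prop := out = solution_alt N number
instance (N : Int) (number : Int) (out : Int) : Decidable (Spec_solution N number out) := by unfold Spec_solution; infer_instance

-- ===== CLAIM (what is proved, stated in full; the proofs are below) =====
def Claim_equal_solution : Prop := ∀ (N : Int) (number : Int), Dom_solution N number → Pre_solution N number → Spec_solution N number (solution N number)

-- ===== LEMMAS AND PROOFS =====

lemma reach_eq (N : Int) (k : Nat) :
    reach N k =
      (List.range' 1 (k - 1)).foldl
        (fun s a => combine s (reach N a) (reach N (k - a)))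
        (Std.TreeSet.empty.insert (concatN N k)) := by
  rw [reach]
  exact List.foldl_attach (f := fun s a => combine s (reach N a) (reach N (k - a)))

lemma foldl_ext_mem {α β : Type} (l : List α) (f g : β → α → β) (b : β)
    (h : ∀ s a, a ∈ l → f s a = g s a) : l.foldl f b = l.foldl g b := by
  induction l generalizing b with
  | nil => rfl
  | cons x xs ih =>
      simp only [List.foldl_cons]
      rw [h b x (by simp)]
      exact ih _ (fun s a ha => h s a (by simp [ha]))

lemma levelStep_eq_reach (N : Int) (i : Nat) (pn : List (Std.TreeSet Int compare))
    (hlow : ∀ j, 1 ≤ j → j < i → pn.getD j Std.TreeSet.empty = reach N j)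
    (hseed : pn.getD i Std.TreeSet.empty = Std.TreeSet.empty.insert (concatN N i)) :
    levelStep pn i = reach N i := by
  rw [reach_eq, levelStep, hseed]
  apply foldl_ext_mem
  intro s j hj
  rw [List.mem_range'_1] at hj
  rw [hlow j (by omega) (by omega), hlow (i - j) (by omega) (by omega)]

lemma mainLoop_eq (N number : Int) : ∀ (n i : Nat), i + n = 9 → 1 ≤ i →
    ∀ pn : List (Std.TreeSet Int compare), pn.length = 9 →
    (∀ j, 1 ≤ j → j < i → pn.getD j Std.TreeSet.empty = reach N j) →
    (∀ j, i ≤ j → j < 9 → pn.getD j Std.TreeSet.empty = Std.TreeSet.empty.insert (concatN N j)) →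
    mainLoop number pn i =
      (match (List.range' i n).find? (fun k => (reach N k).contains number) with
       | some k => (k : Int) | none => -1) := by
  intro n
  induction n with
  | zero =>
      intro i hi _ pn _ _ _
      rw [mainLoop]
      simp [show ¬ i < 9 by omega]
  | succ n ih =>
      intro i hi h1 pn hlen hlow hup
      have hi9 : i < 9 := by omega
      have hstep : levelStep pn i = reach N i :=
        levelStep_eq_reach N i pn hlow (hup i le_rfl hi9)
      have hget : (pn.set i (levelStep pn i)).getD i Std.TreeSet.empty = reach N i := by
        rw [List.getD_eq_getElem?_getD, List.getElem?_set_self (by omega), hstep]; rfl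
      have hlow' : ∀ j, 1 ≤ j → j < i + 1 →
          (pn.set i (levelStep pn i)).getD j Std.TreeSet.empty = reach N j := by
        intro j hj1 hj2
        by_cases hji : j = i
        · subst hji; exact hget
        · rw [List.getD_eq_getElem?_getD, List.getElem?_set_ne (by omega),
              ← List.getD_eq_getElem?_getD]
          exact hlow j hj1 (by omega)
      have hup' : ∀ j, i + 1 ≤ j → j < 9 →
          (pn.set i (levelStep pn i)).getD j Std.TreeSet.empty = Std.TreeSet.empty.insert (concatN N j) := by
        intro j hj1 hj2
        rw [List.getD_eq_getElem?_getD, List.getElem?_set_ne (by omega),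
            ← List.getD_eq_getElem?_getD]
        exact hup j (by omega) hj2
      rw [mainLoop]
      simp only [dif_pos hi9]
      rw [hget, List.range'_succ]
      cases hmem : (reach N i).contains number with
      | true =>
          rw [List.find?_cons_of_pos (p := fun k => (reach N k).contains number) (h := hmem)]
          simp
      | false =>
          rw [List.find?_cons_of_neg (p := fun k => (reach N k).contains number)
                (h := by simp [hmem]), if_neg (by simp)]
          exact ih (i + 1) (by omega) (by omega) _ (by simp [hlen]) hlow' hup'

lemma seedSets_len (N : Int) : (seedSets N).length = 9 := by
  simp [seedSets, List.range']

lemma seedSets_getD (N : Int) (j : Nat) (h1 : 1 ≤ j) (h2 : j < 9) :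
    (seedSets N).getD j Std.TreeSet.empty = Std.TreeSet.empty.insert (concatN N j) := by
  interval_cases j <;> rfl

-- ===== VERDICT (by name: the statement is the Claim_ definition above) =====
theorem solution_spec : Claim_equal_solution := by
  intro N number _ _
  show solution N number = solution_alt N number
  rw [solution, solution_alt,
      mainLoop_eq N number 8 1 rfl le_rfl (seedSets N) (seedSets_len N)
        (fun j hj1 hj2 => absurd hj2 (by omega))
        (fun j hj1 hj2 => seedSets_getD N j hj1 hj2)]
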